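-- pv_equiv track=rewrite | github.com/jeno8522/Coding-Test-Study | 10월/3주차/프로그래머스/그리디/큰 수 만들기.py | solution
-- ===== SOURCE A (Python) =====
-- from collections import deque
--
-- def solution(number, k):
--     nums = deque(number)
--     res = []
--     res.append(nums.popleft())
--     remove_cnt = 0
--     while nums:
--         num = nums.popleft()
--         while res and res[-1] < num and remove_cnt < k: #nums에서 popleft() 한것보다 res[-1]이 작으면 res.pop() (remove_cnt == k 될때까지)
--             res.pop()
--             remove_cnt += 1
--         res.append(num) #해당 요소 res에 append, 만약 remove_cnt == k 되면 남은 nums 요소를 res에 append 해줌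
--     return ''.join(res[:len(number) - k])   #주어진 number가 내림차순이라면 res의 요소가 pop() 안되므로 결과에서 슬라이싱해줌
-- ===== SOURCE B (Python) =====
-- def solution(number, k):
--     # Greedy window selection: pick the leftmost maximal digit of the feasible
--     # window, then recurse on the remainder (instead of A's pop-stack scan).
--     keep = len(number) - k
--     if keep >= len(number):
--         return number
--     res = []
--     rest = number
--     while keep > 0:
--         window = rest[:len(rest) - keep + 1]
--         d = max(window)
--         j = window.index(d)
--         res.append(d)
--         rest = rest[j + 1:]
--         keep -= 1
--     return ''.join(res)
-- ===== Notes on version B (the rewrite author's own statement) =====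
-- stated objective: alternative
-- what changed: Replaces A's budgeted pop-stack (deque + while-pop with a removal counter, then a final slice) by greedy window selection: repeatedly take the leftmost maximum of the prefix that still leaves enough characters, and recurse on the suffix after it.
-- intended difference: For k > len(number) with k - len(number) less than the number of suffix-maxima of the string, A's negative final slice res[:len(number)-k] returns a nonempty leftover of its stack (e.g. '2' for ('21', 3)), while B returns '' as intended when asked to remove at least every character. — e.g. on solution("21", 3): A returns "2", B returns ""
import Mathlib
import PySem

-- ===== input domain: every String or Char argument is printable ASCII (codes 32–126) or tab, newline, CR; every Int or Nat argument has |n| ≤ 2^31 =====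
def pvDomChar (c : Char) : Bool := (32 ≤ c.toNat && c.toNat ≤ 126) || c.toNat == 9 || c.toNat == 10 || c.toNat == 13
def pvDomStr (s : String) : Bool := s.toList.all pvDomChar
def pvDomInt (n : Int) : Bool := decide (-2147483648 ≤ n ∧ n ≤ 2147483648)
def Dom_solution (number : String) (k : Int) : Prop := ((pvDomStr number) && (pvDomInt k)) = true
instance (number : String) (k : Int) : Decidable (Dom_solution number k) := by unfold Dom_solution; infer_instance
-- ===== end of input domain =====

-- B is a different algorithm (greedy window selection instead of A's budgeted pop-stack);
-- equal to A except where stated in D_solution below; A raises IndexError on "" (Pre_).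

-- ===== PORT A =====
-- the inner `while res and res[-1] < num and remove_cnt < k` loop;
-- the stack `res` is kept reversed (head = res[-1], the top), so pop/append act on the head
def popPhase (k : Int) (res : List Char) (num : Char) (cnt : Int) : List Char × Int :=
  match res with
  | [] => ([], cnt)
  | t :: rest => if t < num ∧ cnt < k then popPhase k rest num (cnt + 1) else (t :: rest, cnt)

-- the outer `while nums` loop: state = (nums, res reversed, remove_cnt)
def aLoop (k : Int) : List Char → List Char → Int → List Char
  | [], res, _ => res
  | x :: xs, res, cnt =>
      let p := popPhase k res x cnt
      aLoop k xs (x :: p.1) p.2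

def solution (number : String) (k : Int) : String :=
  match number.toList with
  | [] => ""  -- Python raises IndexError here (popleft from an empty deque); excluded by Pre_solution
  | x :: xs =>
      -- res.append(nums.popleft()); loop; ''.join(res[:len(number)-k])
      String.ofList (PySem.List.slice (aLoop k xs [x] 0).reverse none
        (some ((number.toList.length : Int) - k)))

-- ===== PORT B =====
-- the `while keep > 0` loop of Source B, recursion on keep
def bLoop : List Char → Nat → List Char
  | _, 0 => []
  | rest, m + 1 =>
    let window := PySem.List.slice rest none (some ((rest.length : Int) - ((m : Int) + 1) + 1))
    match PySem.List.max? window (fun y => y) with   -- max(window)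
    | none => []                                     -- unreachable: window is nonempty whenever reached
    | some d =>
      match PySem.List.index? window d with          -- window.index(d)
      | none => []                                   -- unreachable: d ∈ window
      | some j => d :: bLoop (PySem.List.slice rest (some ((j : Int) + 1)) none) m

def solution_alt (number : String) (k : Int) : String :=
  let n : Int := (number.toList.length : Int)
  let keep : Int := n - k
  if n ≤ keep then number
  else String.ofList (bLoop number.toList keep.toNat)

-- ===== PRECONDITION & SPEC =====
-- Pre_ excludes only the empty string, on which A raises IndexError (popleft from an empty deque)
def Pre_solution (number : String) (k : Int) : Prop := number ≠ ""
instance (number : String) (k : Int) : Decidable (Pre_solution number k) := by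
  unfold Pre_solution; infer_instance

def pvWitness_solution : String × Int := ("1924", 2)

-- number of positions whose character is ≥ every later character (the suffix maxima)
def sufMaxCount : List Char → Nat
  | [] => 0
  | c :: t => (if t.all (fun d => d ≤ c) then 1 else 0) + sufMaxCount t

-- For k > len(number) with k - len(number) < sufMaxCount, A's negative final slice
-- res[:len(number)-k] returns a nonempty leftover of its stack, while B returns "" as
-- intended when asked to remove at least every character.
def D_solution (number : String) (k : Int) : Prop :=
  (number.toList.length : Int) < k ∧
    k < (number.toList.length : Int) + (sufMaxCount number.toList : Int)
instance (number : String) (k : Int) : Decidable (D_solution number k) := by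
  unfold D_solution; infer_instance

def Spec_solution (number : String) (k : Int) (out : String) : Prop :=
  ¬ D_solution number k → out = solution_alt number k
instance (number : String) (k : Int) (out : String) : Decidable (Spec_solution number k out) := by
  unfold Spec_solution; infer_instance

def pvDiffWitness_solution : String × Int := ("21", 3)
def pvDiffWitnessOut_solution : String × String := ("2", "")

-- ===== CLAIM (what is proved, stated in full; the proofs are below) =====
def Claim_unchanged_solution : Prop := ∀ (number : String) (k : Int),
  Dom_solution number k → Pre_solution number k → Spec_solution number k (solution number k)
def Claim_changed_solution : Prop :=
  Dom_solution (pvDiffWitness_solution.1) (pvDiffWitness_solution.2) ∧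
  Pre_solution (pvDiffWitness_solution.1) (pvDiffWitness_solution.2) ∧
  D_solution (pvDiffWitness_solution.1) (pvDiffWitness_solution.2) ∧
  solution (pvDiffWitness_solution.1) (pvDiffWitness_solution.2) = pvDiffWitnessOut_solution.1 ∧
  solution_alt (pvDiffWitness_solution.1) (pvDiffWitness_solution.2) = pvDiffWitnessOut_solution.2 ∧
  pvDiffWitnessOut_solution.1 ≠ pvDiffWitnessOut_solution.2
def Claim_exact_solution : Prop := ∀ (number : String) (k : Int),
  Dom_solution number k → Pre_solution number k → D_solution number k →
    solution number k ≠ solution_alt number k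

-- ===== LEMMAS AND PROOFS =====

-- the in-order list of suffix maxima (A's stack when the budget never binds)
def sufMaxList : List Char → List Char
  | [] => []
  | c :: t => if t.all (fun d => d ≤ c) then c :: sufMaxList t else sufMaxList t

theorem length_sufMaxList (l : List Char) : (sufMaxList l).length = sufMaxCount l := by
  induction l with
  | nil => rfl
  | cons c t ih => simp only [sufMaxList, sufMaxCount]; split <;> simp [ih] <;> omega

-- popPhase pops some prefix of the (reversed) stack and counts the pops
theorem popPhase_drop (k : Int) (st : List Char) (x : Char) (cnt : Int) :
    ∃ p ≤ st.length, popPhase k st x cnt = (st.drop p, cnt + p) := by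
  induction st generalizing cnt with
  | nil => exact ⟨0, by simp [popPhase]⟩
  | cons t rest ih =>
    by_cases h : t < x ∧ cnt < k
    · obtain ⟨p, hp, he⟩ := ih (cnt + 1)
      exact ⟨p + 1, by simpa using hp, by
        simp [popPhase, h, he]; omega⟩
    · exact ⟨0, by simp, by simp [popPhase, h]⟩

theorem popPhase_clears (k : Int) (st : List Char) (x : Char) (cnt : Int)
    (hlt : ∀ d ∈ st, d < x) (hb : cnt + st.length ≤ k) :
    popPhase k st x cnt = ([], cnt + st.length) := by
  induction st generalizing cnt with
  | nil => simp [popPhase]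
  | cons t rest ih =>
    have h1 : t < x := hlt t (by simp)
    have h2 : cnt < k := by simp at hb; omega
    rw [popPhase]
    simp only [h1, h2, and_self, if_true]
    rw [ih (cnt + 1) (fun d hd => hlt d (by simp [hd])) (by simp at hb ⊢; omega)]
    simp only [List.length_cons, Prod.mk.injEq, true_and]
    push_cast; ring

theorem popPhase_append (k : Int) (st : List Char) (c x : Char) (cnt : Int)
    (h : cnt + st.length < k → ¬ c < x) :
    popPhase k (st ++ [c]) x cnt =
      ((popPhase k st x cnt).1 ++ [c], (popPhase k st x cnt).2) := by
  induction st generalizing cnt with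
  | nil =>
    have : ¬ (c < x ∧ cnt < k) := by
      intro ⟨h1, h2⟩; exact h (by simpa using h2) h1
    simp [popPhase, this]
  | cons t rest ih =>
    by_cases hc : t < x ∧ cnt < k
    · simp only [List.cons_append, popPhase, hc, and_self, if_true]
      exact ih (cnt + 1) (by intro hh; exact h (by simp at hh ⊢; omega))
    · simp [popPhase, hc]

theorem popPhase_shift (k : Int) (st : List Char) (x : Char) (cnt d : Int) :
    popPhase (k + d) st x (cnt + d) = ((popPhase k st x cnt).1, (popPhase k st x cnt).2 + d) := by
  induction st generalizing cnt with
  | nil => simp [popPhase]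
  | cons t rest ih =>
    by_cases h : t < x ∧ cnt < k
    · have : t < x ∧ cnt + d < k + d := ⟨h.1, by omega⟩
      rw [popPhase, if_pos this, show cnt + d + 1 = (cnt + 1) + d by ring, ih,
        popPhase, if_pos h]
    · have : ¬ (t < x ∧ cnt + d < k + d) := by
        intro ⟨h1, h2⟩; exact h ⟨h1, by omega⟩
      simp [popPhase, h, this]

theorem aLoop_shift (k : Int) (xs st : List Char) (cnt d : Int) :
    aLoop (k + d) xs st (cnt + d) = aLoop k xs st cnt := by
  induction xs generalizing st cnt with
  | nil => rfl
  | cons x xs ih => rw [aLoop, aLoop, popPhase_shift]; exact ih _ _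

theorem aLoop_no_budget (k : Int) (xs st : List Char) (cnt : Int) (h : k ≤ cnt) :
    aLoop k xs st cnt = xs.reverse ++ st := by
  induction xs generalizing st cnt with
  | nil => simp [aLoop]
  | cons x xs ih =>
    have hp : popPhase k st x cnt = (st, cnt) := by
      cases st with
      | nil => rfl
      | cons t rest =>
        have : ¬ (t < x ∧ cnt < k) := by intro ⟨_, h2⟩; omega
        simp [popPhase, this]
    rw [aLoop, hp]
    simp [ih _ _ h]

theorem aLoop_clear (k : Int) (c : Char) (zs : List Char) :
    ∀ (ys st : List Char) (cnt : Int), (∀ d ∈ st, d < c) → (∀ d ∈ ys, d < c) →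
    cnt + st.length + ys.length ≤ k →
    aLoop k (ys ++ c :: zs) st cnt = aLoop k zs [c] (cnt + st.length + ys.length) := by
  intro ys
  induction ys with
  | nil =>
    intro st cnt hst _ hb
    rw [List.nil_append, aLoop, popPhase_clears k st c cnt hst (by simpa using hb)]
    simp
  | cons y ys ih =>
    intro st cnt hst hys hb
    obtain ⟨p, hp, he⟩ := popPhase_drop k st y cnt
    rw [List.cons_append, aLoop, he]
    have h1 : ∀ d ∈ y :: st.drop p, d < c := by
      intro d hd
      rcases List.mem_cons.mp hd with h | h
      · exact h ▸ hys y (by simp)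
      · exact hst d (List.mem_of_mem_drop h)
    have := ih (y :: st.drop p) (cnt + p) h1 (fun d hd => hys d (by simp [hd])) (by
      simp only [List.length_cons, List.length_drop] at *
      push_cast at *; omega)
    rw [this]
    congr 1
    simp only [List.length_cons, List.length_drop]
    push_cast; omega

theorem aLoop_bottom (k : Int) (c : Char) :
    ∀ (xs st : List Char) (cnt : Int),
    (∀ (t : Nat) (ht : t < xs.length), cnt + st.length + t < k → xs[t] ≤ c) →
    aLoop k xs (st ++ [c]) cnt = aLoop k xs st cnt ++ [c] := by
  intro xs
  induction xs with
  | nil => intro st cnt _; simp [aLoop]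
  | cons x xs ih =>
    intro st cnt H
    have h0 : cnt + st.length < k → ¬ c < x := by
      intro hlt
      have := H 0 (by simp) (by simpa using hlt)
      simpa using not_lt.mpr this
    obtain ⟨p, hp, he⟩ := popPhase_drop k st x cnt
    rw [aLoop, popPhase_append k st c x cnt h0, he]
    simp only
    rw [← List.cons_append]
    rw [ih (x :: st.drop p) (cnt + p) (by
      intro t ht hlt
      have := H (t + 1) (by simpa using ht) (by
        simp only [List.length_cons, List.length_drop] at *
        push_cast at *; omega)
      simpa using this)]
    rw [aLoop, he]

-- window facts: max?/index? give the leftmost maximum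
theorem window_argmax (w : List Char) (hw : w ≠ []) :
    ∃ d j, PySem.List.max? w (fun y => y) = some d ∧ PySem.List.index? w d = some j ∧
      ∃ (hj : j < w.length), w[j] = d ∧ (∀ i (hi : i < j), w[i] < d) ∧ ∀ y ∈ w, y ≤ d := by
  have hd' : PySem.List.max? w (fun y => y) ≠ none := by
    simp [Ne, PySem.List.max?_eq_none_iff]; exact hw
  obtain ⟨d, hd⟩ := Option.ne_none_iff_exists'.mp hd'
  have hmem : d ∈ w := PySem.List.max?_mem hd
  have hmax : ∀ y ∈ w, y ≤ d := fun y hy => PySem.List.max?_isMax hd y hy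
  have hj' : PySem.List.index? w d ≠ none := by
    simp [Ne, PySem.List.index?_eq_none_iff]; exact hmem
  obtain ⟨j, hj⟩ := Option.ne_none_iff_exists'.mp hj'
  obtain ⟨hjlt, hje, hne⟩ := PySem.List.getElem_of_index?_eq_some hj
  exact ⟨d, j, hd, hj, hjlt, hje, fun i hi => lt_of_le_of_ne
    (hmax _ (List.getElem_mem _)) (hne i (by omega)), hmax⟩

-- one selection step: running A on s splits off the leftmost maximum d at index j
theorem aLoop_select (k : Int) (s : List Char) (d : Char) (j : Nat) (hj : j < s.length)
    (hje : s[j] = d) (hlt : ∀ i (hi : i < j), s[i] < d) (hjk : (j : Int) ≤ k)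
    (hcov : ∀ t (ht : j + 1 + t < s.length), (j : Int) + t < k → s[j + 1 + t] ≤ d) :
    aLoop k s [] 0 = aLoop (k - j) (s.drop (j + 1)) [] 0 ++ [d] := by
  have hsplit : s = s.take j ++ d :: s.drop (j + 1) := by
    conv_lhs => rw [← List.take_append_drop j s, List.drop_eq_getElem_cons hj]
    rw [hje]
  have hys : ∀ e ∈ s.take j, e < d := by
    intro e he
    obtain ⟨i, hi, rfl⟩ := List.mem_iff_getElem.mp he
    rw [List.getElem_take]
    exact hlt i (by simp at hi; omega)
  have hlen : (s.take j).length = j := by simp; omega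
  have h1 := aLoop_clear k d (s.drop (j + 1)) (s.take j) [] 0 (by simp) hys
    (by simp [hlen]; omega)
  rw [hlen] at h1
  simp only [List.length_nil, Nat.cast_zero, add_zero, zero_add] at h1
  have h2 := aLoop_bottom k d (s.drop (j + 1)) [] j (by
    intro t ht hb
    have ht' : j + 1 + t < s.length := by simp at ht; omega
    have : (s.drop (j + 1))[t] = s[j + 1 + t] := List.getElem_drop
    rw [this]
    exact hcov t ht' (by simp at hb; omega))
  simp only [List.nil_append] at h2
  have h3 := aLoop_shift (k - j) (s.drop (j + 1)) [] 0 j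
  rw [show (k - j) + (j : Int) = k by ring, show (0 : Int) + (j : Int) = (j : Int) by ring] at h3
  conv_lhs => rw [hsplit]
  rw [h1, h2, h3]

theorem main_L2 : ∀ (m : Nat) (s : List Char), m ≤ s.length →
    ((aLoop ((s.length : Int) - (m : Int)) s [] 0).reverse).take m = bLoop s m := by
  intro m
  induction m with
  | zero => intro s _; simp [bLoop]
  | succ m ih =>
    intro s hm
    have hmn : m < s.length := by omega
    have hq1 : 1 ≤ s.length - m := by omega
    have hwin : PySem.List.slice s none (some ((s.length : Int) - ((m : Int) + 1) + 1)) =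
        s.take (s.length - m) := by
      rw [show (s.length : Int) - ((m : Int) + 1) + 1 = ((s.length - m : Nat) : Int) by
        push_cast; omega]
      exact PySem.List.slice_to_natCast s _
    have hwne : s.take (s.length - m) ≠ [] := by
      intro hnil
      rcases List.take_eq_nil_iff.mp hnil with h | h
      · omega
      · subst h; simp at hmn
    obtain ⟨d, j, hd, hjx, hjlt, hje, hltw, hlew⟩ := window_argmax _ hwne
    have hjq : j < s.length - m := by simpa using hjlt
    -- B side
    have hcast : ((j : Int) + 1) = ((j + 1 : Nat) : Int) := by push_cast; ring
    have hB : bLoop s (m + 1) = d :: bLoop (s.drop (j + 1)) m := by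
      simp only [bLoop, hwin, hd, hjx, hcast, PySem.List.slice_from_natCast]
    -- A side
    have hsel := aLoop_select ((s.length : Int) - ((m : Int) + 1)) s d j (by omega)
      (by rw [← hje]; exact (List.getElem_take).symm)
      (by intro i hi
          have : s[i]'(by omega) = (s.take (s.length - m))[i]'(by simpa using (by omega : i < s.length - m)) :=
            (List.getElem_take).symm
          rw [this]; exact hltw i (by omega))
      (by push_cast; omega)
      (by intro t ht hb
          have htq : j + 1 + t < s.length - m := by push_cast at hb; omega
          have : s[j + 1 + t] = (s.take (s.length - m))[j + 1 + t]'(by simpa using htq) :=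
            (List.getElem_take).symm
          rw [this]
          exact hlew _ (List.getElem_mem _))
    rw [show (s.length : Int) - ((m : Int) + 1 : Int) = (s.length : Int) - ((m + 1 : Nat) : Int) by push_cast; ring] at hsel
    rw [hsel, hB]
    simp only [List.reverse_append, List.reverse_cons, List.reverse_nil, List.nil_append,
      List.cons_append, List.take_succ_cons]
    congr 1
    have hzlen : (s.drop (j + 1)).length = s.length - (j + 1) := by simp
    have := ih (s.drop (j + 1)) (by omega)
    rw [show ((s.drop (j + 1)).length : Int) - (m : Int) =
        (s.length : Int) - ((m + 1 : Nat) : Int) - (j : Int) by rw [hzlen]; push_cast; omega] at this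
    exact this

theorem sufMax_decomp (d : Char) (zs : List Char) (hzs : ∀ e ∈ zs, e ≤ d) :
    ∀ ys, (∀ e ∈ ys, e < d) → sufMaxList (ys ++ d :: zs) = d :: sufMaxList zs := by
  intro ys
  induction ys with
  | nil =>
    intro _
    have : zs.all (fun e => e ≤ d) = true := by
      rw [List.all_eq_true]; intro e he; simpa using hzs e he
    simp [sufMaxList, this]
  | cons y ys ih =>
    intro hys
    have hyd : y < d := hys y (by simp)
    have hall : ¬ ((ys ++ d :: zs).all (fun e => decide (e ≤ y)) = true) := by
      rw [List.all_eq_true]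
      intro hA
      have := hA d (by simp)
      simp at this
      exact absurd hyd (not_lt.mpr this)
    simp only [List.cons_append, sufMaxList, if_neg hall]
    exact ih (fun e he => hys e (by simp [he]))

theorem main_L3 : ∀ (N : Nat) (s : List Char), s.length ≤ N → ∀ (k : Int),
    (s.length : Int) ≤ k → (aLoop k s [] 0).reverse = sufMaxList s := by
  intro N
  induction N with
  | zero =>
    intro s hs k _
    have : s = [] := List.length_eq_zero_iff.mp (by omega)
    subst this; simp [aLoop, sufMaxList]
  | succ N ih =>
    intro s hs k hk
    rcases List.eq_nil_or_concat' s with rfl | _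
    · simp [aLoop, sufMaxList]
    · have hne : s ≠ [] := by
        rename_i h; obtain ⟨_, _, rfl⟩ := h; simp
      have hsl : 1 ≤ s.length := by
        cases s with | nil => exact absurd rfl hne | cons a t => simp
      obtain ⟨d, j, hd, hjx, hjlt, hje, hltw, hlew⟩ := window_argmax s hne
      have hsel := aLoop_select k s d j hjlt hje hltw (by push_cast; omega)
        (fun t ht _ => hlew _ (List.getElem_mem _))
      rw [hsel]
      have hzlen : (s.drop (j + 1)).length = s.length - (j + 1) := by simp
      have hIH := ih (s.drop (j + 1)) (by omega) (k - j) (by rw [hzlen]; push_cast; omega)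
      rw [List.reverse_append]
      simp only [List.reverse_cons, List.reverse_nil, List.nil_append, List.cons_append]
      rw [hIH]
      have hsplit : s = s.take j ++ d :: s.drop (j + 1) := by
        conv_lhs => rw [← List.take_append_drop j s, List.drop_eq_getElem_cons hjlt]
        rw [hje]
      conv_rhs => rw [hsplit]
      rw [sufMax_decomp d (s.drop (j + 1))
        (fun e he => hlew e (List.mem_of_mem_drop he))
        (s.take j) (by
          intro e he
          obtain ⟨i, hi, rfl⟩ := List.mem_iff_getElem.mp he
          rw [List.getElem_take]
          exact hltw i (by simp at hi; omega))]

theorem aLoop_start (k : Int) (x : Char) (xs : List Char) (cnt : Int) :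
    aLoop k (x :: xs) [] cnt = aLoop k xs [x] cnt := rfl

theorem solution_eval (number : String) (k : Int) (x : Char) (xs : List Char)
    (hs : number.toList = x :: xs) :
    solution number k = String.ofList (PySem.List.slice (aLoop k number.toList [] 0).reverse
      none (some ((number.toList.length : Int) - k))) := by
  simp only [solution, hs, aLoop_start]

-- A = B on every admitted input outside D_ (the three ranges of k)
theorem agree_outside (number : String) (k : Int) (hpre : Pre_solution number k)
    (hnd : ¬ D_solution number k) : solution number k = solution_alt number k := by
  have hne : number.toList ≠ [] := fun h => hpre (String.toList_eq_nil_iff.mp h)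
  obtain ⟨x, xs, hs⟩ := List.exists_cons_of_ne_nil hne
  have hA := solution_eval number k x xs hs
  set s := number.toList with hsdef
  set n : Int := (s.length : Int) with hn
  have hn1 : 1 ≤ s.length := by rw [hs]; simp
  rcases le_or_gt k 0 with hk | hk
  · -- k ≤ 0: no removal on either side
    have hres : aLoop k s [] 0 = s.reverse := by
      rw [aLoop_no_budget k s [] 0 hk]; simp
    rw [hA, hres, List.reverse_reverse]
    have hb : PySem.List.slice s none (some (n - k)) = s := by
      rw [PySem.List.slice_to s (show (0:Int) ≤ n - k by omega)]
      apply List.take_of_length_le; omega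
    rw [hb, hsdef, String.ofList_toList]
    simp only [solution_alt]
    rw [if_pos (by omega)]
  · rcases le_or_gt k n with hkn | hkn
    · -- 0 < k ≤ n: the main equivalence
      have hm : ((n - k).toNat : Int) = n - k := Int.toNat_of_nonneg (by omega)
      have hmle : (n - k).toNat ≤ s.length := by omega
      have hL2 := main_L2 (n - k).toNat s hmle
      rw [show ((s.length : Int) - ((n - k).toNat : Int)) = k by rw [hm]; omega] at hL2
      rw [hA, PySem.List.slice_to _ (show (0:Int) ≤ n - k by omega), hL2]
      simp only [solution_alt]
      rw [if_neg (by omega)]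
    · -- n < k: both sides empty, since ¬ D_ bounds the suffix-maxima count
      have hsmc : (sufMaxCount s : Int) ≤ k - n := by
        unfold D_solution at hnd
        rw [← hsdef] at hnd
        push_neg at hnd
        have := hnd (by omega)
        omega
      have hres := main_L3 s.length s le_rfl k (by omega)
      rw [hA, hres]
      have hneg : n - k = -(((k - n).toNat : Nat) : Int) := by
        rw [Int.toNat_of_nonneg (by omega)]; omega
      rw [hneg, PySem.List.slice_to_neg_natCast _ _ (by omega)]
      rw [length_sufMaxList]
      rw [show sufMaxCount s - (k - n).toNat = 0 by omega, List.take_zero]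
      simp only [solution_alt]
      rw [if_neg (by omega), show (n - k).toNat = 0 by omega, bLoop]

-- ===== VERDICT (by name: the statement is the Claim_ definition above) =====
theorem solution_spec : Claim_unchanged_solution := by
  intro number k _ hpre
  intro hnd
  exact agree_outside number k hpre hnd

theorem solution_changed : Claim_changed_solution := by
  unfold Claim_changed_solution; decide

theorem solution_tight : Claim_exact_solution := by
  intro number k _ hpre hD
  obtain ⟨hk1, hk2⟩ := hD
  have hne : number.toList ≠ [] := fun h => hpre (String.toList_eq_nil_iff.mp h)
  obtain ⟨x, xs, hs⟩ := List.exists_cons_of_ne_nil hne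
  have hA := solution_eval number k x xs hs
  set s := number.toList with hsdef
  set n : Int := (s.length : Int) with hn
  have hn1 : 1 ≤ s.length := by rw [hs]; simp
  have hres := main_L3 s.length s le_rfl k (by omega)
  rw [hA, hres]
  have hneg : n - k = -(((k - n).toNat : Nat) : Int) := by
    rw [Int.toNat_of_nonneg (by omega)]; omega
  rw [hneg, PySem.List.slice_to_neg_natCast _ _ (by omega)]
  have hlen : (List.take ((sufMaxList s).length - (k - n).toNat) (sufMaxList s)).length =
      sufMaxCount s - (k - n).toNat := by
    simp [length_sufMaxList]
  have hpos : 0 < sufMaxCount s - (k - n).toNat := by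
    rw [length_sufMaxList] at *
    omega
  have hBval : solution_alt number k = "" := by
    simp only [solution_alt]
    rw [if_neg (by omega), show (n - k).toNat = 0 by omega, bLoop]
  rw [hBval]
  intro hcontra
  have : (List.take ((sufMaxList s).length - (k - n).toNat) (sufMaxList s)) = [] := by
    have := congrArg String.toList hcontra
    simpa using this
  rw [this] at hlen
  simp at hlen
  omega
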